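-- pv_equiv track=rewrite | github.com/feamando/pmos | tools/slack/slack_brain_writer.py | append_to_section
-- ===== SOURCE A (Python) =====
-- def append_to_section(content: str, section: str, new_content: str) -> str:
--     """
--     Append content to a specific section in a markdown file.
--
--     If section doesn't exist, creates it at the end.
--     """
--     section_header = f"## {section}"
--
--     if section_header in content:
--         # Find section and append before next section or end
--         lines = content.split("\n")
--         result = []
--         in_section = False
--         appended = False
--
--         for i, line in enumerate(lines):
--             if line.strip() == section_header:
--                 in_section = True
--                 result.append(line)
--                 continue
--
--             if in_section and line.startswith("## ") and not appended:
--                 # New section starting, append before it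
--                 result.append("")
--                 result.append(new_content)
--                 result.append("")
--                 appended = True
--                 in_section = False
--
--             result.append(line)
--
--         if in_section and not appended:
--             # Section was at end of file
--             result.append("")
--             result.append(new_content)
--
--         return "\n".join(result)
--     else:
--         # Section doesn't exist, add at end
--         return f"{content.rstrip()}\n\n{section_header}\n\n{new_content}\n"
-- ===== SOURCE B (Python) =====
-- def append_to_section(content: str, section: str, new_content: str) -> str:
--     """Append content to a markdown section: locate the header line, then splice."""
--     section_header = f"## {section}"
--     if section_header not in content:
--         return f"{content.rstrip()}\n\n{section_header}\n\n{new_content}\n"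
--     lines = content.split("\n")
--     i = next((k for k, l in enumerate(lines) if l.strip() == section_header), None)
--     if i is None:
--         # substring match without a standalone header line: nothing to do
--         return "\n".join(lines)
--     for j in range(i + 1, len(lines)):
--         if lines[j].startswith("## ") and lines[j].strip() != section_header:
--             return "\n".join(lines[:j] + ["", new_content, ""] + lines[j:])
--     return "\n".join(lines + ["", new_content])
-- ===== Notes on version B (the rewrite author's own statement) =====
-- stated objective: alternative
-- what changed: Replaces A's single-pass state machine with three flags (in_section/appended plus the growing result list) by a find-then-splice decomposition: locate the header line index, locate the next section-boundary index, and splice ['', new_content, ''] into the line list at that point.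
import Mathlib
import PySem

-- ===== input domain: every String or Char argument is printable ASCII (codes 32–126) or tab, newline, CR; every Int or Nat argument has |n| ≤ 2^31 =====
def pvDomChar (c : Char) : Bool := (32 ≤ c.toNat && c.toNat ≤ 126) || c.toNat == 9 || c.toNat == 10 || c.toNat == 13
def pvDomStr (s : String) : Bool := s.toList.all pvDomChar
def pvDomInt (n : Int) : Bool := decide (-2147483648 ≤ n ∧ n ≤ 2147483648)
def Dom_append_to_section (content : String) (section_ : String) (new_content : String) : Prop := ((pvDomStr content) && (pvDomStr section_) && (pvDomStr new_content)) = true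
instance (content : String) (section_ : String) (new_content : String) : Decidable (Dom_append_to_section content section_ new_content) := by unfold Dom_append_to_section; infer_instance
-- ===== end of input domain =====

-- B replaces A's single-pass three-flag state machine with a find-header-index,
-- find-boundary-index, then splice decomposition (objective: alternative, same cost).

-- ===== PORT A =====
-- the for-loop of A: state (result, in_section, appended); the loop index i is unused in A
def pvLoopA (hdr nc : String) : List String → Bool → Bool → List String × Bool × Bool
  | [], ins, app => ([], ins, app)
  | l :: rest, ins, app =>
    if PySem.Str.strip l == hdr then
      let r := pvLoopA hdr nc rest true app
      (l :: r.1, r.2)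
    else if ins && PySem.Str.startswith l "## " && !app then
      let r := pvLoopA hdr nc rest false true
      ("" :: nc :: "" :: l :: r.1, r.2)
    else
      let r := pvLoopA hdr nc rest ins app
      (l :: r.1, r.2)

def append_to_section (content : String) (section_ : String) (new_content : String) : String :=
  let section_header := PySem.Str.join "" ["## ", section_]
  if PySem.Str.isIn section_header content then
    -- content.split("\n"): sep ≠ "" so split? is always some
    let lines := (PySem.Str.split? content "\n").getD []
    let r := pvLoopA section_header new_content lines false false
    let result := if r.2.1 && !r.2.2 then r.1 ++ ["", new_content] else r.1
    PySem.Str.join "\n" result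
  else
    PySem.Str.join "" [PySem.Str.rstrip content, "\n\n", section_header, "\n\n", new_content, "\n"]

-- ===== PORT B =====
-- next((k for k, l in enumerate(lines) if l.strip() == section_header), None)
def pvFindHdr (hdr : String) : List String → Option Nat
  | [] => none
  | l :: rest =>
    if PySem.Str.strip l == hdr then some 0
    else (pvFindHdr hdr rest).map (· + 1)

-- 'for j in range(i+1, len(lines))' with early return: scans lines.drop (i+1)
-- carrying the absolute index j (exact: every j of the range is in range of lines)
def pvFindBoundary (hdr : String) : List String → Nat → Option Nat
  | [], _ => none
  | l :: rest, j =>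
    if PySem.Str.startswith l "## " && !(PySem.Str.strip l == hdr) then some j
    else pvFindBoundary hdr rest (j + 1)

def append_to_section_alt (content : String) (section_ : String) (new_content : String) : String :=
  let section_header := PySem.Str.join "" ["## ", section_]
  if PySem.Str.isIn section_header content then
    -- content.split("\n"): sep ≠ "" so split? is always some
    let lines := (PySem.Str.split? content "\n").getD []
    match pvFindHdr section_header lines with
    | none => PySem.Str.join "\n" lines
    | some i =>
      match pvFindBoundary section_header (lines.drop (i + 1)) (i + 1) with
      | none => PySem.Str.join "\n" (lines ++ ["", new_content])
      | some j => PySem.Str.join "\n" (lines.take j ++ ["", new_content, ""] ++ lines.drop j)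
  else
    PySem.Str.join "" [PySem.Str.rstrip content, "\n\n", section_header, "\n\n", new_content, "\n"]

-- ===== PRECONDITION & SPEC =====
def Spec_append_to_section (content : String) (section_ : String) (new_content : String) (out : String) : Prop := out = append_to_section_alt content section_ new_content
instance (content : String) (section_ : String) (new_content : String) (out : String) : Decidable (Spec_append_to_section content section_ new_content out) := by unfold Spec_append_to_section; infer_instance

-- ===== CLAIM (what is proved, stated in full; the proofs are below) =====
def Claim_equal_append_to_section : Prop := ∀ (content : String) (section_ : String) (new_content : String), Dom_append_to_section content section_ new_content → Spec_append_to_section content section_ new_content (append_to_section content section_ new_content)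

-- ===== LEMMAS AND PROOFS =====

-- boundary predicate shorthand used only in proofs
def pvIsB (hdr : String) (l : String) : Bool :=
  PySem.Str.startswith l "## " && !(PySem.Str.strip l == hdr)

-- once appended, the loop just copies its input and appended stays set
theorem pvLoopA_app_true (hdr nc : String) (xs : List String) (ins : Bool) :
    (pvLoopA hdr nc xs ins true).1 = xs ∧ (pvLoopA hdr nc xs ins true).2.2 = true := by
  induction xs generalizing ins with
  | nil => simp [pvLoopA]
  | cons l rest ih =>
    simp only [pvLoopA]
    split
    · simpa using ih true
    · simpa using ih ins

-- before the header is seen (ins = app = false), the loop copies and keeps state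
theorem pvLoopA_prefix (hdr nc : String) (pre ys : List String)
    (h : ∀ m ∈ pre, (PySem.Str.strip m == hdr) = false) :
    pvLoopA hdr nc (pre ++ ys) false false =
      ((pre ++ (pvLoopA hdr nc ys false false).1), (pvLoopA hdr nc ys false false).2) := by
  induction pre with
  | nil => simp
  | cons m rest ih =>
    have hm := h m (List.mem_cons_self ..)
    simp only [List.cons_append, pvLoopA, hm, Bool.false_and]
    rw [ih (fun x hx => h x (List.mem_cons_of_mem _ hx))]
    simp

-- in the section with nothing appended yet, non-boundary lines are copied, state kept
theorem pvLoopA_inSection_prefix (hdr nc : String) (pre ys : List String)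
    (h : ∀ m ∈ pre, pvIsB hdr m = false) :
    pvLoopA hdr nc (pre ++ ys) true false =
      ((pre ++ (pvLoopA hdr nc ys true false).1), (pvLoopA hdr nc ys true false).2) := by
  induction pre with
  | nil => simp
  | cons m rest ih =>
    have hm := h m (List.mem_cons_self ..)
    have ih' := ih (fun x hx => h x (List.mem_cons_of_mem _ hx))
    simp only [pvIsB, Bool.and_eq_false_iff] at hm
    simp only [List.cons_append, pvLoopA]
    by_cases hs : (PySem.Str.strip m == hdr) = true
    · rw [if_pos hs, ih']
    · rw [if_neg hs]
      rcases hm with hm | hm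
      · have hm' : PySem.Chars.startswith m.toList ['#', '#', ' '] = false := by
          simpa using hm
        rw [if_neg (by simp [hm']), ih']
      · simp only [Bool.not_eq_eq_eq_not, Bool.not_false] at hm
        exact absurd hm hs

-- characterisation of pvFindHdr
theorem pvFindHdr_none (hdr : String) (xs : List String)
    (h : pvFindHdr hdr xs = none) : ∀ l ∈ xs, (PySem.Str.strip l == hdr) = false := by
  induction xs with
  | nil => simp
  | cons l rest ih =>
    intro x hx
    simp only [pvFindHdr] at h
    by_cases hl : (PySem.Str.strip l == hdr) = true
    · rw [if_pos hl] at h; exact absurd h (by simp)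
    · rw [if_neg hl] at h
      rcases List.mem_cons.mp hx with rfl | hx
      · simpa using hl
      · exact ih (Option.map_eq_none_iff.mp h) x hx

theorem pvFindHdr_some (hdr : String) (xs : List String) (i : Nat)
    (h : pvFindHdr hdr xs = some i) :
    ∃ pre l suf, xs = pre ++ l :: suf ∧ pre.length = i ∧
      (∀ m ∈ pre, (PySem.Str.strip m == hdr) = false) ∧ (PySem.Str.strip l == hdr) = true := by
  induction xs generalizing i with
  | nil => simp [pvFindHdr] at h
  | cons l rest ih =>
    simp only [pvFindHdr] at h
    by_cases hl : (PySem.Str.strip l == hdr) = true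
    · rw [if_pos hl] at h
      obtain rfl : (0 : Nat) = i := by simpa using h
      exact ⟨[], l, rest, by simp, by simp, by simp, hl⟩
    · rw [if_neg hl] at h
      obtain ⟨i', hi', rfl⟩ := Option.map_eq_some_iff.mp h
      obtain ⟨pre, l', suf, rfl, hlen, hpre, hl'⟩ := ih i' hi'
      refine ⟨l :: pre, l', suf, rfl, by simp [hlen], ?_, hl'⟩
      intro m hm
      rcases List.mem_cons.mp hm with rfl | hm
      · simpa using hl
      · exact hpre m hm

theorem pvFindBoundary_shift (hdr : String) (xs : List String) (j : Nat) :
    pvFindBoundary hdr xs j = (pvFindBoundary hdr xs 0).map (· + j) := by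
  induction xs generalizing j with
  | nil => simp [pvFindBoundary]
  | cons l rest ih =>
    simp only [pvFindBoundary]
    by_cases hl : (PySem.Str.startswith l "## " && !(PySem.Str.strip l == hdr)) = true
    · rw [if_pos hl, if_pos hl]; simp
    · rw [if_neg hl, if_neg hl, ih (j + 1), ih 1, Option.map_map]
      congr 1
      funext k
      simp; omega

theorem pvFindBoundary_none (hdr : String) (xs : List String)
    (h : pvFindBoundary hdr xs 0 = none) : ∀ l ∈ xs, pvIsB hdr l = false := by
  induction xs with
  | nil => simp
  | cons l rest ih =>
    intro x hx
    simp only [pvFindBoundary] at h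
    by_cases hl : (PySem.Str.startswith l "## " && !(PySem.Str.strip l == hdr)) = true
    · rw [if_pos hl] at h; exact absurd h (by simp)
    · rw [if_neg hl, pvFindBoundary_shift] at h
      rcases List.mem_cons.mp hx with rfl | hx
      · simpa [pvIsB] using hl
      · exact ih (Option.map_eq_none_iff.mp h) x hx

theorem pvFindBoundary_some (hdr : String) (xs : List String) (k : Nat)
    (h : pvFindBoundary hdr xs 0 = some k) :
    ∃ pre b suf, xs = pre ++ b :: suf ∧ pre.length = k ∧
      (∀ m ∈ pre, pvIsB hdr m = false) ∧ pvIsB hdr b = true := by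
  induction xs generalizing k with
  | nil => simp [pvFindBoundary] at h
  | cons l rest ih =>
    simp only [pvFindBoundary] at h
    by_cases hl : (PySem.Str.startswith l "## " && !(PySem.Str.strip l == hdr)) = true
    · rw [if_pos hl] at h
      obtain rfl : (0 : Nat) = k := by simpa using h
      exact ⟨[], l, rest, by simp, by simp, by simp, by simpa [pvIsB] using hl⟩
    · rw [if_neg hl, pvFindBoundary_shift] at h
      obtain ⟨k', hk', hk⟩ := Option.map_eq_some_iff.mp h
      obtain ⟨pre, b, suf, rfl, hlen, hpre, hb⟩ := ih k' hk'
      refine ⟨l :: pre, b, suf, rfl, by simp [hlen]; omega, ?_, hb⟩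
      intro m hm
      rcases List.mem_cons.mp hm with rfl | hm
      · simpa [pvIsB] using hl
      · exact hpre m hm

-- phase 2, no boundary: the loop copies and stays (true, false)
theorem pvLoopA_inSection_none (hdr nc : String) (xs : List String)
    (h : ∀ l ∈ xs, pvIsB hdr l = false) :
    pvLoopA hdr nc xs true false = (xs, true, false) := by
  have := pvLoopA_inSection_prefix hdr nc xs [] h
  simpa [pvLoopA] using this

-- the core list-level equivalence, for the branch where the substring is present
theorem pvCore (hdr nc : String) (lines : List String) :
    (if (pvLoopA hdr nc lines false false).2.1 && !(pvLoopA hdr nc lines false false).2.2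
     then (pvLoopA hdr nc lines false false).1 ++ ["", nc]
     else (pvLoopA hdr nc lines false false).1) =
    (match pvFindHdr hdr lines with
     | none => lines
     | some i =>
       match pvFindBoundary hdr (lines.drop (i + 1)) (i + 1) with
       | none => lines ++ ["", nc]
       | some j => lines.take j ++ ["", nc, ""] ++ lines.drop j) := by
  cases hfind : pvFindHdr hdr lines with
  | none =>
    have hall := pvFindHdr_none hdr lines hfind
    have := pvLoopA_prefix hdr nc lines [] hall
    simp only [List.append_nil] at this
    simp [this, pvLoopA]
  | some i =>
    obtain ⟨pre, l, suf, rfl, hlen, hpre, hl⟩ := pvFindHdr_some hdr lines i hfind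
    have e1 : pre ++ l :: suf = (pre ++ [l]) ++ suf := by simp
    have hdrop : (pre ++ l :: suf).drop (i + 1) = suf := by
      rw [e1, show i + 1 = (pre ++ [l]).length by simp [hlen]]
      exact List.drop_left ..
    have htake : (pre ++ l :: suf).take (i + 1) = pre ++ [l] := by
      rw [e1, show i + 1 = (pre ++ [l]).length by simp [hlen]]
      exact List.take_left ..
    rw [pvLoopA_prefix hdr nc pre (l :: suf) hpre]
    simp only [pvLoopA, if_pos hl, hdrop]
    cases hb : pvFindBoundary hdr suf (i + 1) with
    | none =>
      rw [pvFindBoundary_shift] at hb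
      have h0 : pvFindBoundary hdr suf 0 = none := by
        cases h' : pvFindBoundary hdr suf 0 <;> simp [h'] at hb ⊢
      have hsec := pvLoopA_inSection_none hdr nc suf (pvFindBoundary_none hdr suf h0)
      simp [hsec]
    | some j =>
      rw [pvFindBoundary_shift] at hb
      obtain ⟨k, hk, rfl⟩ := Option.map_eq_some_iff.mp hb
      obtain ⟨pre2, b, suf2, rfl, hlen2, hpre2, hbb⟩ := pvFindBoundary_some hdr suf k hk
      rw [pvLoopA_inSection_prefix hdr nc pre2 (b :: suf2) hpre2]
      simp only [pvIsB, Bool.and_eq_true, Bool.not_eq_eq_eq_not, Bool.not_true] at hbb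
      have hb1 : PySem.Chars.startswith b.toList ['#', '#', ' '] = true := by
        simpa using hbb.1
      have happ := pvLoopA_app_true hdr nc suf2 false
      have e2 : pre ++ l :: (pre2 ++ b :: suf2) = (pre ++ l :: pre2) ++ b :: suf2 := by simp
      have htake2 : (pre ++ l :: (pre2 ++ b :: suf2)).take (k + (i + 1)) =
          pre ++ l :: pre2 := by
        rw [e2, show k + (i + 1) = (pre ++ l :: pre2).length by simp [hlen, hlen2]; omega]
        exact List.take_left ..
      have hdrop2 : (pre ++ l :: (pre2 ++ b :: suf2)).drop (k + (i + 1)) = b :: suf2 := by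
        rw [e2, show k + (i + 1) = (pre ++ l :: pre2).length by simp [hlen, hlen2]; omega]
        exact List.drop_left ..
      simp [pvLoopA, hbb.2, hb1, happ.1, happ.2, htake2, hdrop2]

-- ===== VERDICT (by name: the statement is the Claim_ definition above) =====
theorem append_to_section_spec : Claim_equal_append_to_section := by
  intro content section_ new_content _
  unfold Spec_append_to_section append_to_section append_to_section_alt
  by_cases hin : PySem.Str.isIn (PySem.Str.join "" ["## ", section_]) content = true
  · simp only [hin, if_pos]
    have h := pvCore (PySem.Str.join "" ["## ", section_]) new_content
      ((PySem.Str.split? content "\n").getD [])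
    cases hfind : pvFindHdr (PySem.Str.join "" ["## ", section_])
        ((PySem.Str.split? content "\n").getD []) with
    | none =>
      simp only [hfind] at h ⊢
      rw [h]
    | some i =>
      simp only [hfind] at h ⊢
      cases hb : pvFindBoundary (PySem.Str.join "" ["## ", section_])
          (((PySem.Str.split? content "\n").getD []).drop (i + 1)) (i + 1) with
      | none => simp only [hb] at h ⊢; rw [h]
      | some j => simp only [hb] at h ⊢; rw [h]
  · simp only [hin, Bool.false_eq_true, if_false]
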